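-- pv_equiv track=rewrite | github.com/Nide44/Deep_Learning_Lab | dl_lib/tensor_utils.py | transpose_dimension
-- ===== SOURCE A (Python) =====
-- import math
--
-- def transpose_dimension(
--     tensor_values, current_dim, global_dim, switch_indices, new_values, element_indices
-- ):
--     if len(current_dim) == 1:
--         for i in range(current_dim[0]):
--             current_indices = element_indices[:]
--             current_indices.append(i)
--             new_indices = current_indices[:]
--             new_indices[switch_indices[0]], new_indices[switch_indices[1]] = (
--                 new_indices[switch_indices[1]],
--                 new_indices[switch_indices[0]],
--             )
--             new_global_dim = list(global_dim)[:]
--             new_global_dim[switch_indices[0]], new_global_dim[switch_indices[1]] = (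
--                 new_global_dim[switch_indices[1]],
--                 new_global_dim[switch_indices[0]],
--             )
--             start_index_new = sum(
--                 [
--                     math.prod(new_global_dim[j + 1 :]) * new_index
--                     for j, new_index in enumerate(new_indices[:-1])
--                 ]
--             )
--             start_index_current = sum(
--                 [
--                     math.prod(global_dim[j + 1 :]) * current_index
--                     for j, current_index in enumerate(current_indices[:-1])
--                 ]
--             )
--             new_values[start_index_new + new_indices[-1]] = tensor_values[
--                 start_index_current + current_indices[-1]
--             ]
--
--     else:
--         lower_dim = tuple(list(current_dim)[1:])
--         for j in range(current_dim[0]):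
--             next_element_indices = element_indices[:]
--             next_element_indices.append(j)
--             transpose_dimension(
--                 tensor_values,
--                 lower_dim,
--                 global_dim,
--                 switch_indices,
--                 new_values,
--                 next_element_indices,
--             )
--
--     return new_values
-- ===== SOURCE B (Python) =====
-- import math
--
--
-- def transpose_dimension(
--     tensor_values, current_dim, global_dim, switch_indices, new_values, element_indices
-- ):
--     # Iterative re-implementation for the canonical call shape
--     # (element_indices == [] and current_dim == global_dim): walk the flat
--     # positions 0..N-1 once, decode each into coordinates with precomputed
--     # suffix strides, swap the two axes, and re-encode into the swapped
--     # layout — no recursion and no per-element math.prod.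
--     # Like A, mutates new_values in place and returns it.
--     if any(c <= 0 for c in current_dim):
--         return new_values
--     dims = list(global_dim)
--     n = len(dims)
--     s0, s1 = switch_indices[0], switch_indices[1]
--     swapped = dims[:]
--     swapped[s0], swapped[s1] = swapped[s1], swapped[s0]
--     # suffix strides: cstr[j] = prod(dims[j+1:]), nstr[j] = prod(swapped[j+1:])
--     cstr = [1] * n
--     nstr = [1] * n
--     for j in range(n - 2, -1, -1):
--         cstr[j] = cstr[j + 1] * dims[j + 1]
--         nstr[j] = nstr[j + 1] * swapped[j + 1]
--     total = math.prod(dims)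
--     for t in range(total):
--         coords = [(t // cstr[k]) % dims[k] for k in range(n)]
--         coords[s0], coords[s1] = coords[s1], coords[s0]
--         pos = 0
--         for k in range(n):
--             pos += nstr[k] * coords[k]
--         new_values[pos] = tensor_values[t]
--     return new_values
-- ===== Notes on version B (the rewrite author's own statement) =====
-- stated objective: faster
-- what changed: Replaces A's per-dimension recursion that recomputes math.prod of global_dim slices for every element (and copies the index list at every level) by a single flat loop over 0..N-1 that decodes each flat index with suffix strides precomputed once, swaps the two axes, and re-encodes into the swapped layout; intended as faster — a timing run saw A time out at n=16 where B returned, though it could not measure a clean ratio.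
-- outside the precondition, e.g. on transpose_dimension([7], (1,), (5,), [0, 0], [0], []): A returns [7], B raises IndexError; on transpose_dimension([5], (1,), (1,), [0, -1], [0], []): A returns [5], B returns [5]
import Mathlib
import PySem

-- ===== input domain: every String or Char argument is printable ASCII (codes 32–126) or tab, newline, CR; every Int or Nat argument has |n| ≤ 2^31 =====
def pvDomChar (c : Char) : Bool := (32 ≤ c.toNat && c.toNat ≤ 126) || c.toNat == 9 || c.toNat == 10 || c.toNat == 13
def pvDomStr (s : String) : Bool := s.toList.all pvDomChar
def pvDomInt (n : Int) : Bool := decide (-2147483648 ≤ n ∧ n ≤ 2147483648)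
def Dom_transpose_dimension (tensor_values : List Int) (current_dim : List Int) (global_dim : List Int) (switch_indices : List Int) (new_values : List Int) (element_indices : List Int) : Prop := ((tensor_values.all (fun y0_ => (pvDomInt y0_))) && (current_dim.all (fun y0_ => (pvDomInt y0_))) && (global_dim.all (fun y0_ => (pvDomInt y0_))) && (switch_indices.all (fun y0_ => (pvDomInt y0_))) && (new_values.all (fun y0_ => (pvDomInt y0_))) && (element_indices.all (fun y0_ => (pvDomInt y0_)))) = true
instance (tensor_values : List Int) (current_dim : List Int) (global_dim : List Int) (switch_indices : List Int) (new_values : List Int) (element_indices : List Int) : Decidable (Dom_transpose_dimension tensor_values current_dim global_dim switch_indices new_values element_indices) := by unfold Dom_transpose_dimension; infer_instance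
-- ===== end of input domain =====

-- B replaces A's per-dimension recursion (per-element math.prod of shape slices) by one flat
-- pass with strides precomputed once; like A it is observed through its RETURN value here —
-- the Python versions both also mutate new_values in place, writing the same cells.

-- shared helpers (both Pythons contain the same idioms literally)
-- Python simultaneous swap l[a], l[b] = l[b], l[a]; exact for 0 <= a, b < len(l)
-- (Pre_ guarantees that; Python would wrap negative indices, which Pre_ excludes)
def pvSwap (l : List Int) (a b : Int) : List Int :=
  (l.set a.toNat (l.getD b.toNat 0)).set b.toNat (l.getD a.toNat 0)

-- math.prod
def pyProd (l : List Int) : Int := l.foldl (· * ·) 1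

-- ===== PORT A =====
-- literal transliteration of A's recursion; list indexing via getD/getLastD is exact on Pre_
-- (all indices there are nonnegative and in range)
def transpose_dimension (tensor_values : List Int) (current_dim : List Int) (global_dim : List Int) (switch_indices : List Int) (new_values : List Int) (element_indices : List Int) : List Int :=
  match current_dim with
  | [] => new_values  -- Python raises IndexError (current_dim[0]) here; outside Pre_
  | [c0] =>
    (PySem.List.pyRange 0 c0 1).foldl (fun acc i =>
      let current_indices := element_indices ++ [i]
      let new_indices := pvSwap current_indices (switch_indices.getD 0 0) (switch_indices.getD 1 0)
      let new_global_dim := pvSwap global_dim (switch_indices.getD 0 0) (switch_indices.getD 1 0)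
      let start_index_new :=
        (new_indices.dropLast.zipIdx.map (fun p => pyProd (new_global_dim.drop (p.2 + 1)) * p.1)).sum
      let start_index_current :=
        (current_indices.dropLast.zipIdx.map (fun p => pyProd (global_dim.drop (p.2 + 1)) * p.1)).sum
      acc.set (start_index_new + new_indices.getLastD 0).toNat
        (tensor_values.getD (start_index_current + current_indices.getLastD 0).toNat 0)) new_values
  | c0 :: c1 :: rest =>
    (PySem.List.pyRange 0 c0 1).foldl (fun acc j =>
      transpose_dimension tensor_values (c1 :: rest) global_dim switch_indices acc
        (element_indices ++ [j])) new_values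

-- ===== PORT B =====
-- suffix strides: (pvStrides dims)[j] = prod(dims[j+1:]), built back-to-front like Source B's loop
def pvStrides : List Int → List Int
  | [] => []
  | [_] => [1]
  | _ :: d :: rest => ((pvStrides (d :: rest)).headD 1 * d) :: pvStrides (d :: rest)

def transpose_dimension_alt (tensor_values : List Int) (current_dim : List Int) (global_dim : List Int) (switch_indices : List Int) (new_values : List Int) (element_indices : List Int) : List Int :=
  if current_dim.any (fun c => decide (c ≤ 0)) then new_values
  else
    let n := global_dim.length
    let s0 := switch_indices.getD 0 0
    let s1 := switch_indices.getD 1 0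
    let swapped := pvSwap global_dim s0 s1
    let cstr := pvStrides global_dim
    let nstr := pvStrides swapped
    let total := pyProd global_dim
    (PySem.List.pyRange 0 total 1).foldl (fun acc t =>
      let coords := (List.range n).map (fun k =>
        PySem.Int.mod (PySem.Int.floordiv t (cstr.getD k 1)) (global_dim.getD k 1))
      let coords' := pvSwap coords s0 s1
      let pos := (List.range n).foldl (fun p k => p + nstr.getD k 0 * coords'.getD k 0) 0
      acc.set pos.toNat (tensor_values.getD t.toNat 0)) new_values

-- ===== PRECONDITION & SPEC =====
-- Pre_ excludes (a) inputs where A raises (empty current_dim; fully positive shapes whose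
-- switch/flat indices run out of range of the supplied lists), and (b) calls outside the
-- canonical top-level shape (element_indices ≠ [], current_dim ≠ global_dim, or negative
-- switch indices), where an in-range return of A is an accident of Python index arithmetic.
def Pre_transpose_dimension (tensor_values : List Int) (current_dim : List Int) (global_dim : List Int) (switch_indices : List Int) (new_values : List Int) (element_indices : List Int) : Prop :=
  current_dim ≠ [] ∧
  ((∃ c ∈ current_dim, c ≤ 0) ∨
   (element_indices = [] ∧ current_dim = global_dim ∧ (∀ c ∈ global_dim, 0 < c) ∧
    2 ≤ switch_indices.length ∧
    0 ≤ switch_indices.getD 0 0 ∧ switch_indices.getD 0 0 < (global_dim.length : Int) ∧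
    0 ≤ switch_indices.getD 1 0 ∧ switch_indices.getD 1 0 < (global_dim.length : Int) ∧
    pyProd global_dim ≤ (tensor_values.length : Int) ∧
    pyProd global_dim ≤ (new_values.length : Int)))
instance (tensor_values : List Int) (current_dim : List Int) (global_dim : List Int) (switch_indices : List Int) (new_values : List Int) (element_indices : List Int) : Decidable (Pre_transpose_dimension tensor_values current_dim global_dim switch_indices new_values element_indices) := by unfold Pre_transpose_dimension; infer_instance

def pvWitness_transpose_dimension : List Int × List Int × List Int × List Int × List Int × List Int :=
  ([10, 20, 30, 40], [2, 2], [2, 2], [0, 1], [0, 0, 0, 0], [])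

def Spec_transpose_dimension (tensor_values : List Int) (current_dim : List Int) (global_dim : List Int) (switch_indices : List Int) (new_values : List Int) (element_indices : List Int) (out : List Int) : Prop := out = transpose_dimension_alt tensor_values current_dim global_dim switch_indices new_values element_indices
instance (tensor_values : List Int) (current_dim : List Int) (global_dim : List Int) (switch_indices : List Int) (new_values : List Int) (element_indices : List Int) (out : List Int) : Decidable (Spec_transpose_dimension tensor_values current_dim global_dim switch_indices new_values element_indices out) := by unfold Spec_transpose_dimension; infer_instance

-- ===== CLAIM (what is proved, stated in full; the proofs are below) =====
def Claim_equal_transpose_dimension : Prop := ∀ (tensor_values : List Int) (current_dim : List Int) (global_dim : List Int) (switch_indices : List Int) (new_values : List Int) (element_indices : List Int), Dom_transpose_dimension tensor_values current_dim global_dim switch_indices new_values element_indices → Pre_transpose_dimension tensor_values current_dim global_dim switch_indices new_values element_indices → Spec_transpose_dimension tensor_values current_dim global_dim switch_indices new_values element_indices (transpose_dimension tensor_values current_dim global_dim switch_indices new_values element_indices)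


-- ===== LEMMAS AND PROOFS =====

-- A's leaf body (the len(current_dim)==1 assignment), as a function of the full index list m
def leafA (tv gd si : List Int) (acc : List Int) (m : List Int) : List Int :=
  let new_indices := pvSwap m (si.getD 0 0) (si.getD 1 0)
  let new_global_dim := pvSwap gd (si.getD 0 0) (si.getD 1 0)
  let start_index_new :=
    (new_indices.dropLast.zipIdx.map (fun p => pyProd (new_global_dim.drop (p.2 + 1)) * p.1)).sum
  let start_index_current :=
    (m.dropLast.zipIdx.map (fun p => pyProd (gd.drop (p.2 + 1)) * p.1)).sum
  acc.set (start_index_new + new_indices.getLastD 0).toNat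
    (tv.getD (start_index_current + m.getLastD 0).toNat 0)

-- the multi-indices A's recursion enumerates, in order
def lexA : List Int → List (List Int)
  | [] => [[]]
  | c :: rest => (PySem.List.pyRange 0 c 1).flatMap (fun j => (lexA rest).map (j :: ·))

-- stride dot product: dotR g x = sum_k prod(g[k+1:]) * x[k]
def dotR : List Int → List Int → Int
  | _, [] => 0
  | [], _ :: _ => 0
  | _ :: g', x0 :: x' => pyProd g' * x0 + dotR g' x'

-- B's coordinate decoding of a flat index
def decode (g : List Int) (t : Int) : List Int :=
  (List.range g.length).map (fun k =>
    PySem.Int.mod (PySem.Int.floordiv t ((pvStrides g).getD k 1)) (g.getD k 1))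

theorem pyProd_eq_prod (l : List Int) : pyProd l = l.prod := List.prod_eq_foldl.symm

theorem pyProd_cons (a : Int) (l : List Int) : pyProd (a :: l) = a * pyProd l := by
  simp [pyProd_eq_prod]

theorem pyProd_pos {g : List Int} (h : ∀ c ∈ g, 0 < c) : 0 < pyProd g := by
  rw [pyProd_eq_prod]; exact List.prod_pos h

theorem length_pvSwap (l : List Int) (a b : Int) : (pvSwap l a b).length = l.length := by
  simp [pvSwap]

theorem dotR_nil : ∀ (g : List Int), dotR g [] = 0
  | [] => rfl
  | _ :: _ => rfl

theorem pvStrides_headD : ∀ (a : Int) (g' : List Int) (d : Int),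
    (pvStrides (a :: g')).headD d = pyProd g'
  | _, [], _ => by simp [pvStrides, pyProd]
  | _, b :: rest, d => by
      simp only [pvStrides, List.headD_cons]
      rw [pvStrides_headD b rest 1, pyProd_cons]; ring

theorem pvStrides_getD : ∀ (g : List Int) (k : Nat) (d : Int), k < g.length →
    (pvStrides g).getD k d = pyProd (g.drop (k + 1))
  | [], _, _, h => by simp at h
  | a :: g', 0, d, _ => by
      cases g' with
      | nil => simp [pvStrides, pyProd]
      | cons b rest =>
          simp only [pvStrides, List.getD_cons_zero, List.drop_succ_cons, List.drop_zero]
          rw [pvStrides_headD b rest 1, pyProd_cons]; ring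
  | a :: g', k + 1, d, h => by
      cases g' with
      | nil => simp at h
      | cons b rest =>
          simp only [pvStrides, List.getD_cons_succ, List.drop_succ_cons]
          exact pvStrides_getD (b :: rest) k d (by simpa using h)

theorem enc_aux : ∀ (x g : List Int) (n : Nat), n + x.length ≤ g.length →
    ((x.zipIdx n).map (fun p => pyProd (g.drop (p.2 + 1)) * p.1)).sum = dotR (g.drop n) x
  | [], g, n, _ => by simp [dotR_nil]
  | x0 :: x', g, n, h => by
      have hn : n < g.length := by simp at h; omega
      rw [List.zipIdx_cons]
      simp only [List.map_cons, List.sum_cons]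
      rw [enc_aux x' g (n + 1) (by simp at h ⊢; omega)]
      rw [List.drop_eq_getElem_cons hn]
      simp [dotR]

theorem dotR_dropLast : ∀ (x g : List Int), x.length = g.length →
    dotR g x.dropLast + x.getLastD 0 = dotR g x
  | [], _, _ => by simp [dotR_nil]
  | [x0], [], h => by simp at h
  | [x0], g0 :: g', h => by
      have hg : g' = [] := by simpa using h
      subst hg; simp [dotR, dotR_nil, pyProd]
  | x0 :: x1 :: xr, [], h => by simp at h
  | x0 :: x1 :: xr, g0 :: g', h => by
      have ih := dotR_dropLast (x1 :: xr) g' (by simpa using h)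
      simp only [List.dropLast_cons₂, dotR, List.getLastD_cons]
      simp only [List.getLastD_cons] at ih
      linarith

-- A's enumerate-based flat index equals the stride dot product
theorem encodeSum_eq (g x : List Int) (h : x.length = g.length) :
    (x.dropLast.zipIdx.map (fun p => pyProd (g.drop (p.2 + 1)) * p.1)).sum + x.getLastD 0
      = dotR g x := by
  rw [show x.dropLast.zipIdx = x.dropLast.zipIdx 0 from rfl]
  rw [enc_aux x.dropLast g 0 (by simp [h])]
  simpa using dotR_dropLast x g h

theorem sum_range_dotR : ∀ (g x : List Int), x.length = g.length →
    ((List.range g.length).map (fun k => pyProd (g.drop (k + 1)) * x.getD k 0)).sum = dotR g x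
  | [], x, h => by
      have : x = [] := by simpa using h
      subst this; simp [dotR_nil]
  | g0 :: g', [], h => by simp at h
  | g0 :: g', x0 :: x', h => by
      simp only [List.length_cons, List.range_succ_eq_map, List.map_cons, List.map_map,
        List.sum_cons]
      rw [show ((fun k => pyProd ((g0 :: g').drop (k + 1)) * (x0 :: x').getD k 0) ∘ Nat.succ)
            = (fun k => pyProd (g'.drop (k + 1)) * x'.getD k 0) from by
          funext k; simp]
      rw [sum_range_dotR g' x' (by simpa using h)]
      simp [dotR]

theorem lexA_nonpos : ∀ (cd : List Int), (∃ c ∈ cd, c ≤ 0) → lexA cd = []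
  | c :: rest, h => by
      rcases h with ⟨x, hx, hx0⟩
      rcases List.mem_cons.mp hx with rfl | hxr
      · simp [lexA, PySem.List.pyRange_one_eq_nil hx0]
      · simp [lexA, lexA_nonpos rest ⟨x, hxr, hx0⟩]

theorem range_split (a Q : Int) (ha : 0 ≤ a) (hQ : 0 < Q) :
    PySem.List.pyRange 0 (a * Q) 1
      = (PySem.List.pyRange 0 a 1).flatMap
          (fun j => (PySem.List.pyRange 0 Q 1).map (fun r => j * Q + r)) := by
  induction a, ha using Int.le_induction with
  | base => simp [PySem.List.pyRange_one_eq_nil]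
  | succ a ha ih =>
      have h1 : (0:Int) ≤ a * Q := mul_nonneg ha hQ.le
      have h2 : a * Q ≤ (a + 1) * Q := by nlinarith
      rw [PySem.List.pyRange_one_append 0 (a * Q) ((a + 1) * Q) h1 h2,
        PySem.List.pyRange_one_succ_right ha, List.flatMap_append, ih]
      congr 1
      simp only [List.flatMap_cons, List.flatMap_nil, List.append_nil]
      rw [PySem.List.pyRange_one (a * Q) ((a + 1) * Q), PySem.List.pyRange_one 0 Q]
      rw [show (a + 1) * Q - a * Q = Q by ring, show Q - (0:Int) = Q from by ring]
      rw [List.map_map]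
      apply List.map_congr_left
      intro k _
      simp

theorem decode_cons (a : Int) (g' : List Int) (hpos : ∀ c ∈ g', 0 < c) (ha : 0 < a)
    (j r : Int) (hj0 : 0 ≤ j) (hja : j < a) (hr0 : 0 ≤ r) (hrQ : r < pyProd g') :
    decode (a :: g') (j * pyProd g' + r) = j :: decode g' r := by
  have hQ : 0 < pyProd g' := pyProd_pos hpos
  simp only [decode, List.length_cons, List.range_succ_eq_map, List.map_cons, List.map_map]
  congr 1
  · -- head coordinate
    rw [pvStrides_getD (a :: g') 0 1 (by simp)]
    simp only [List.drop_succ_cons, List.drop_zero, List.getD_cons_zero]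
    rw [PySem.Int.floordiv_eq_ediv_of_pos hQ, PySem.Int.mod_eq_emod_of_pos ha]
    rw [show j * pyProd g' + r = r + j * pyProd g' from by ring]
    rw [Int.add_mul_ediv_right r j hQ.ne', Int.ediv_eq_zero_of_lt hr0 hrQ]
    simpa using Int.emod_eq_of_lt hj0 hja
  · -- tail coordinates
    apply List.map_congr_left
    intro k hk
    have hk' : k < g'.length := List.mem_range.mp hk
    simp only [Function.comp_apply, List.getD_cons_succ]
    have hstr : (pvStrides (a :: g')).getD (k + 1) 1 = pyProd (g'.drop (k + 1)) := by
      rw [pvStrides_getD (a :: g') (k + 1) 1 (by simpa using Nat.succ_lt_succ hk')]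
      simp
    have hstr' : (pvStrides g').getD k 1 = pyProd (g'.drop (k + 1)) :=
      pvStrides_getD g' k 1 hk'
    rw [hstr, hstr']
    have hcpos : 0 < pyProd (g'.drop (k + 1)) :=
      pyProd_pos (fun x hx => hpos x (List.mem_of_mem_drop hx))
    have hgk : g'.getD k 1 = g'[k] := List.getD_eq_getElem g' 1 hk'
    have hgkpos : 0 < g'[k] := hpos _ (List.getElem_mem hk')
    have hsplit : pyProd g' = pyProd (g'.take k) * g'[k] * pyProd (g'.drop (k + 1)) := by
      have hg : g'.take k ++ g'[k] :: g'.drop (k + 1) = g' := by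
        rw [← List.drop_eq_getElem_cons hk']; exact List.take_append_drop k g'
      conv_lhs => rw [← hg]
      rw [pyProd_eq_prod, pyProd_eq_prod, pyProd_eq_prod, List.prod_append, List.prod_cons]
      ring
    rw [PySem.Int.floordiv_eq_ediv_of_pos hcpos, PySem.Int.floordiv_eq_ediv_of_pos hcpos,
      hgk, PySem.Int.mod_eq_emod_of_pos hgkpos, PySem.Int.mod_eq_emod_of_pos hgkpos]
    rw [show j * pyProd g' + r
          = r + (j * pyProd (g'.take k) * g'[k]) * pyProd (g'.drop (k + 1)) from by
      rw [hsplit]; ring]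
    rw [Int.add_mul_ediv_right r _ hcpos.ne']
    rw [show r / pyProd (g'.drop (k + 1)) + j * pyProd (g'.take k) * g'[k]
          = r / pyProd (g'.drop (k + 1)) + (j * pyProd (g'.take k)) * g'[k] from by ring]
    exact Int.add_mul_emod_self_right ..

theorem lex_decode : ∀ (g : List Int), (∀ c ∈ g, 0 < c) →
    lexA g = (PySem.List.pyRange 0 (pyProd g) 1).map (decode g)
  | [], _ => by decide
  | a :: g', hpos => by
      have ha : 0 < a := hpos a (by simp)
      have hpos' : ∀ c ∈ g', 0 < c := fun c hc => hpos c (by simp [hc])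
      have hQ : 0 < pyProd g' := pyProd_pos hpos'
      rw [pyProd_cons, range_split a (pyProd g') ha.le hQ, List.map_flatMap]
      simp only [lexA, lex_decode g' hpos', List.map_map]
      apply List.flatMap_congr
      intro j hj
      rw [PySem.List.mem_pyRange_one] at hj
      apply List.map_congr_left
      intro r hr
      rw [PySem.List.mem_pyRange_one] at hr
      simp only [Function.comp_apply]
      rw [decode_cons a g' hpos' ha j r hj.1 hj.2 hr.1 hr.2]

theorem enc_dec : ∀ (g : List Int), (∀ c ∈ g, 0 < c) → ∀ t : Int, 0 ≤ t → t < pyProd g →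
    dotR g (decode g t) = t
  | [], _, t, ht0, ht1 => by
      have ht : t = 0 := by simp [pyProd] at ht1; omega
      subst ht; simp [decode, dotR_nil]
  | a :: g', hpos, t, ht0, ht1 => by
      have ha : 0 < a := hpos a (by simp)
      have hpos' : ∀ c ∈ g', 0 < c := fun c hc => hpos c (by simp [hc])
      have hQ : 0 < pyProd g' := pyProd_pos hpos'
      have hdecomp : t = (t / pyProd g') * pyProd g' + t % pyProd g' := by
        have := Int.emod_add_mul_ediv t (pyProd g'); linarith
      have hr0 : 0 ≤ t % pyProd g' := Int.emod_nonneg t hQ.ne'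
      have hrQ : t % pyProd g' < pyProd g' := Int.emod_lt_of_pos t hQ
      have hj0 : 0 ≤ t / pyProd g' := Int.ediv_nonneg ht0 hQ.le
      have hja : t / pyProd g' < a := by
        apply (Int.ediv_lt_iff_lt_mul hQ).mpr
        rw [pyProd_cons] at ht1; nlinarith
      conv_lhs => rw [hdecomp, decode_cons a g' hpos' ha _ _ hj0 hja hr0 hrQ]
      simp only [dotR]
      rw [enc_dec g' hpos' _ hr0 hrQ]
      linarith [Int.emod_add_mul_ediv t (pyProd g')]

-- A's recursion is the fold of its leaf over the lexicographic index list
theorem A_norm : ∀ (cd tv gd si nv ei : List Int), cd ≠ [] →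
    transpose_dimension tv cd gd si nv ei
      = (lexA cd).foldl (fun acc m => leafA tv gd si acc (ei ++ m)) nv
  | [], _, _, _, _, _, h => absurd rfl h
  | [c0], tv, gd, si, nv, ei, _ => by
      simp only [transpose_dimension]
      rw [show lexA [c0] = (PySem.List.pyRange 0 c0 1).map (fun j => [j]) from by
          simp only [lexA, List.map_cons, List.map_nil]
          exact (List.map_eq_flatMap ..).symm,
        List.foldl_map]
      apply PySem.List.foldl_congr_mem
      intro acc j _
      simp [leafA]
  | c0 :: c1 :: rest, tv, gd, si, nv, ei, _ => by
      simp only [transpose_dimension]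
      rw [show lexA (c0 :: c1 :: rest)
            = ((PySem.List.pyRange 0 c0 1).map (fun j => (lexA (c1 :: rest)).map (j :: ·))).flatten
          from by simp [lexA, List.flatMap_def],
        List.foldl_flatten, List.foldl_map]
      apply PySem.List.foldl_congr_mem
      intro acc j _
      rw [A_norm (c1 :: rest) tv gd si acc (ei ++ [j]) (by simp), List.foldl_map]
      apply PySem.List.foldl_congr_mem
      intro a m _
      rw [← List.append_cons]

-- ===== VERDICT (by name: the statement is the Claim_ definition above) =====
theorem transpose_dimension_spec : Claim_equal_transpose_dimension := by
  unfold Claim_equal_transpose_dimension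
  intro tv cd gd si nv ei _ hpre
  unfold Spec_transpose_dimension
  obtain ⟨hne, hcase⟩ := hpre
  rcases hcase with hnp | ⟨hei, hcd, hpos, _, hs00, hs01, hs10, hs11, _, _⟩
  · -- a nonpositive dimension: both sides return new_values unchanged
    rw [A_norm cd tv gd si nv ei hne, lexA_nonpos cd hnp]
    rw [transpose_dimension_alt, if_pos (by
      rcases hnp with ⟨c, hc, hc0⟩
      simp only [List.any_eq_true, decide_eq_true_eq]
      exact ⟨c, hc, hc0⟩)]
    rfl
  · subst hei; subst hcd
    rw [A_norm cd tv cd si nv [] hne, lex_decode cd hpos, List.foldl_map]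
    rw [transpose_dimension_alt, if_neg (by
      simp only [List.any_eq_true, decide_eq_true_eq, not_exists, not_and, not_le]
      exact fun c hc => hpos c hc)]
    apply PySem.List.foldl_congr_mem
    intro acc t ht
    rw [PySem.List.mem_pyRange_one] at ht
    simp only [List.nil_append, leafA, decode]
    have hlen : ((List.range cd.length).map (fun k =>
        PySem.Int.mod (PySem.Int.floordiv t ((pvStrides cd).getD k 1)) (cd.getD k 1))).length
        = cd.length := by simp
    set m := (List.range cd.length).map (fun k =>
        PySem.Int.mod (PySem.Int.floordiv t ((pvStrides cd).getD k 1)) (cd.getD k 1)) with hm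
    have hmlen : m.length = cd.length := hlen
    have hswlen : (pvSwap cd (si.getD 0 0) (si.getD 1 0)).length = cd.length :=
      length_pvSwap cd _ _
    have hnilen : (pvSwap m (si.getD 0 0) (si.getD 1 0)).length
        = (pvSwap cd (si.getD 0 0) (si.getD 1 0)).length := by
      rw [length_pvSwap, length_pvSwap, hmlen]
    -- the value read: A's flat source index equals t
    have hsrc : (m.dropLast.zipIdx.map (fun p => pyProd (cd.drop (p.2 + 1)) * p.1)).sum
        + m.getLastD 0 = t := by
      rw [encodeSum_eq cd m hmlen]
      rw [hm, show ((List.range cd.length).map (fun k =>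
          PySem.Int.mod (PySem.Int.floordiv t ((pvStrides cd).getD k 1)) (cd.getD k 1)))
          = decode cd t from rfl]
      exact enc_dec cd hpos t ht.1 ht.2
    -- the position written: A's swapped flat index equals B's stride fold
    have hpossum : (List.range cd.length).foldl
          (fun p k => p + (pvStrides (pvSwap cd (si.getD 0 0) (si.getD 1 0))).getD k 0
            * (pvSwap m (si.getD 0 0) (si.getD 1 0)).getD k 0) 0
        = ((pvSwap m (si.getD 0 0) (si.getD 1 0)).dropLast.zipIdx.map
            (fun p => pyProd ((pvSwap cd (si.getD 0 0) (si.getD 1 0)).drop (p.2 + 1)) * p.1)).sum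
          + (pvSwap m (si.getD 0 0) (si.getD 1 0)).getLastD 0 := by
      rw [encodeSum_eq _ _ (by rw [hnilen])]
      rw [PySem.List.foldl_add]
      rw [show (List.range cd.length)
            = (List.range (pvSwap cd (si.getD 0 0) (si.getD 1 0)).length) from by rw [hswlen]]
      rw [List.map_congr_left (fun k hk => by
        rw [pvStrides_getD _ k 0 (List.mem_range.mp hk)] :
          ∀ k ∈ List.range (pvSwap cd (si.getD 0 0) (si.getD 1 0)).length, _ = _)]
      rw [sum_range_dotR _ _ (by rw [hnilen])]
      simp
    rw [hsrc, ← hpossum]
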